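-- pv_equiv track=rewrite | github.com/khk37601/ExpertAcademy | SWEA/프로그래머스_모의고사.py | solution
-- ===== SOURCE A (Python) =====
-- def solution(answers):
--     student_list = {0: "12345", 1: "21232425", 2: "3311224455"}
--     answer = []
--     student_number = []
--
--     for loop in range(3):
--         count = 0
--
--         while len(student_list[loop]) < len(answers):
--             student_list[loop] *= 2
--
--         student_answer = list(student_list[loop])
--
--         for loop2 in range(0, len(answers)):
--             if answers[loop2] == int(student_answer[loop2]):
--                 count += 1
--
--         answer.append(count)
--
--     max_s = max(answer)
--
--     if answer.count(max_s) >= 3: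
--         return [1, 2, 3]
--     else:
--         for loop in range(len(answer)):
--             if max_s == answer[loop]:
--                 student_number.append(loop + 1)
--
--     return student_number
-- ===== SOURCE B (Python) =====
-- def solution(answers):
--     # Bucket-count answers keyed by (position mod 40, value) in one pass (40 = lcm of the
--     # pattern periods 5, 8, 10), then each student's score is a fixed 40-term table lookup sum.
--     patterns = ("12345", "21232425", "3311224455")
--     cnt = {}
--     for i, a in enumerate(answers):
--         key = (i % 40, a)
--         cnt[key] = cnt.get(key, 0) + 1
--     scores = [sum(cnt.get((j, int(p[j % len(p)])), 0) for j in range(40))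
--               for p in patterns]
--     m = max(scores)
--     return [k + 1 for k, s in enumerate(scores) if s == m]
-- ===== Notes on version B (the rewrite author's own statement) =====
-- stated objective: alternative
-- what changed: Instead of scanning the answers against each pattern, B buckets the answers once into a hash counter keyed by (index mod 40, value) -- 40 being the lcm of the pattern periods -- and reads each student's score off that table as a fixed 40-term sum, so no per-answer pattern comparison happens; A's special three-way-tie branch is subsumed by the max-filter comprehension.
import Mathlib
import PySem

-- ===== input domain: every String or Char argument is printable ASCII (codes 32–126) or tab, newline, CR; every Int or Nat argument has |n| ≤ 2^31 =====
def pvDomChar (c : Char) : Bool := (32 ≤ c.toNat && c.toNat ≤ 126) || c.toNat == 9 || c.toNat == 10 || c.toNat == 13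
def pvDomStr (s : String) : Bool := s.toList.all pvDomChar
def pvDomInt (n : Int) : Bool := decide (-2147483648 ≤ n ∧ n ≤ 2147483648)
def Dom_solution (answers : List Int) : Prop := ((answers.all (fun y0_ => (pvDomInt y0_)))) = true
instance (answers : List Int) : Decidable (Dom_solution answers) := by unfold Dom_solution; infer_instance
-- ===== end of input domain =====

-- B replaces A's three per-pattern scans (with string doubling) by ONE bucketing pass that
-- counts answers keyed by (index mod 40, value) — 40 = lcm of the pattern periods — and then
-- reads each score off that table as a fixed 40-term sum (objective: alternative).

-- ===== PORT A =====
-- int(c) for a single digit character (exact on the digit characters A's patterns contain)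
def pvChInt (c : Char) : Int := Int.ofNat c.toNat - 48

-- A's `while len(s) < n: s *= 2`; the `length = 0` guard only makes the loop total (A's strings are nonempty)
def pvGrow (s : List Char) (n : Nat) : List Char :=
  if _h0 : s.length = 0 then s
  else if _h1 : s.length < n then pvGrow (s ++ s) n else s
termination_by n - s.length
decreasing_by simp only [List.length_append]; omega

-- A's inner `for loop2 in range(0, len(answers)): if answers[loop2] == int(student_answer[loop2]): count += 1`
def pvCountA (answers : List Int) (s : List Char) : Int :=
  (List.range answers.length).foldl (fun c i =>
    if PySem.List.pyGetD answers (Int.ofNat i) 0 = pvChInt (PySem.List.pyGetD s (Int.ofNat i) '0')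
    then c + 1 else c) 0

def solution (answers : List Int) : List Int :=
  let c0 := pvCountA answers (pvGrow "12345".toList answers.length)
  let c1 := pvCountA answers (pvGrow "21232425".toList answers.length)
  let c2 := pvCountA answers (pvGrow "3311224455".toList answers.length)
  let answer : List Int := [c0, c1, c2]
  let max_s := (PySem.List.max? answer (fun x => x)).getD 0
  if answer.count max_s ≥ 3 then [1, 2, 3]
  else (List.range 3).foldl (fun acc i =>
    if max_s = PySem.List.pyGetD answer (Int.ofNat i) 0 then acc ++ [Int.ofNat i + 1] else acc) []

-- ===== PORT B =====
def pvPats : List (List Char) := ["12345".toList, "21232425".toList, "3311224455".toList]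

-- B's bucketing pass: `for i, a in enumerate(answers): cnt[(i % 40, a)] = cnt.get((i % 40, a), 0) + 1`
def pvDictB (answers : List Int) : PySem.Dict (Int × Int) Int :=
  (PySem.List.enumerate answers 0).foldl
    (fun d ia =>
      d.insert (PySem.Int.mod ia.1 40, ia.2) (d.getD (PySem.Int.mod ia.1 40, ia.2) 0 + 1))
    PySem.Dict.empty

-- B's `sum(cnt.get((j, int(p[j % len(p)])), 0) for j in range(40))`
def pvScoreB (cnt : PySem.Dict (Int × Int) Int) (p : List Char) : Int :=
  ((List.range 40).map (fun j =>
    cnt.getD (((j : Nat) : Int), pvChInt (p.getD (j % p.length) '0')) 0)).sum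

def solution_alt (answers : List Int) : List Int :=
  let cnt := pvDictB answers
  let scores := pvPats.map (pvScoreB cnt)
  let m := (PySem.List.max? scores (fun x => x)).getD 0
  (PySem.List.enumerate scores 0).foldl (fun acc ks => if ks.2 = m then acc ++ [ks.1 + 1] else acc) []

-- ===== PRECONDITION & SPEC =====
def Spec_solution (answers : List Int) (out : List Int) : Prop := out = solution_alt answers
instance (answers : List Int) (out : List Int) : Decidable (Spec_solution answers out) := by unfold Spec_solution; infer_instance

-- ===== CLAIM (what is proved, stated in full; the proofs are below) =====
def Claim_equal_solution : Prop := ∀ (answers : List Int), Dom_solution answers → Spec_solution answers (solution answers)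

-- ===== LEMMAS AND PROOFS =====

-- the mathematical count both ports compute for one pattern p
def pvStep (p : List Char) (xs : List Int) (c : Int) (i : Nat) : Int :=
  if xs.getD i 0 = pvChInt (p.getD (i % p.length) '0') then c + 1 else c

def pvCnt (p : List Char) (xs : List Int) : Int :=
  (List.range xs.length).foldl (pvStep p xs) 0

theorem pvGrow_spec (p : List Char) (s : List Char) (n : Nat)
    (hdvd : p.length ∣ s.length) (hs : s.length ≠ 0)
    (hper : ∀ j, j < s.length → s.getD j '0' = p.getD (j % p.length) '0') :
    n ≤ (pvGrow s n).length ∧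
      ∀ j, j < (pvGrow s n).length → (pvGrow s n).getD j '0' = p.getD (j % p.length) '0' := by
  revert hdvd hs hper
  fun_induction pvGrow s n with
  | case1 s h0 => intro _ hs _; exact absurd h0 hs
  | case2 s h0 h1 ih =>
      intro hdvd hs hper
      apply ih
      · simpa [List.length_append] using hdvd.add hdvd
      · simp only [List.length_append]; omega
      · intro j hj
        simp only [List.length_append] at hj
        by_cases hjs : j < s.length
        · rw [List.getD_eq_getElem?_getD, List.getElem?_append_left hjs,
            ← List.getD_eq_getElem?_getD]
          exact hper j hjs
        · have hle : s.length ≤ j := Nat.le_of_not_lt hjs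
          rw [List.getD_eq_getElem?_getD, List.getElem?_append_right hle,
            ← List.getD_eq_getElem?_getD]
          have key : (j - s.length) % p.length = j % p.length := by
            obtain ⟨t, ht⟩ := hdvd
            calc (j - s.length) % p.length
                = (j - s.length + p.length * t) % p.length :=
                  (Nat.add_mul_mod_self_left _ _ _).symm
              _ = j % p.length := by rw [← ht, Nat.sub_add_cancel hle]
          rw [hper (j - s.length) (by omega), key]
  | case3 s h0 h1 =>
      intro _ _ hper
      exact ⟨by omega, hper⟩

theorem countA_eq (answers : List Int) (p : List Char) (hp : p.length ≠ 0) :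
    pvCountA answers (pvGrow p answers.length) = pvCnt p answers := by
  unfold pvCountA pvCnt
  apply PySem.List.foldl_congr_mem
  intro acc i hi
  have hlt : i < answers.length := List.mem_range.mp hi
  have hspec := pvGrow_spec p p answers.length dvd_rfl hp
    (fun j hj => by rw [Nat.mod_eq_of_lt hj])
  have h1 : PySem.List.pyGetD answers (Int.ofNat i) 0 = answers.getD i 0 := by
    simp [PySem.List.pyGetD_natCast]
  have h2 : PySem.List.pyGetD (pvGrow p answers.length) (Int.ofNat i) '0'
      = p.getD (i % p.length) '0' := by
    rw [show (Int.ofNat i) = ((i : Nat) : Int) from rfl, PySem.List.pyGetD_natCast]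
    exact hspec.2 i (lt_of_lt_of_le hlt hspec.1)
  rw [h1, h2, pvStep]

theorem cnt_snoc (p : List Char) (xs : List Int) (x : Int) :
    pvCnt p (xs ++ [x])
      = pvCnt p xs + (if x = pvChInt (p.getD (xs.length % p.length) '0') then 1 else 0) := by
  unfold pvCnt
  rw [List.length_append, List.length_singleton, List.range_succ, List.foldl_append]
  have hcongr : (List.range xs.length).foldl (pvStep p (xs ++ [x])) 0
      = (List.range xs.length).foldl (pvStep p xs) 0 := by
    apply PySem.List.foldl_congr_mem
    intro acc i hi
    have hlt : i < xs.length := List.mem_range.mp hi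
    unfold pvStep
    rw [List.getD_eq_getElem?_getD, List.getElem?_append_left hlt,
      ← List.getD_eq_getElem?_getD]
  have hx : (xs ++ [x]).getD xs.length 0 = x := by
    rw [List.getD_eq_getElem?_getD, List.getElem?_append_right (le_refl _)]
    simp
  simp only [List.foldl, hcongr]
  unfold pvStep
  rw [hx]
  split_ifs <;> omega

-- one pointwise bump at index r < 40 shifts the 40-term table sum by exactly c
theorem sum_map_bump (l : List Nat) (f f' : Nat → Int) (r : Nat) (c : Int)
    (hnd : l.Nodup) (hr : r ∈ l)
    (h : ∀ j ∈ l, f' j = f j + (if j = r then c else 0)) :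
    (l.map f').sum = (l.map f).sum + c := by
  induction l with
  | nil => cases hr
  | cons a l ih =>
      have hna : a ∉ l := (List.nodup_cons.mp hnd).1
      have hnd' : l.Nodup := (List.nodup_cons.mp hnd).2
      rcases List.mem_cons.mp hr with h1 | h1
      · obtain rfl := h1
        have hrest : l.map f' = l.map f := by
          apply List.map_congr_left
          intro j hj
          have hja : j ≠ r := fun e => hna (e ▸ hj)
          simpa [hja] using h j (List.mem_cons_of_mem _ hj)
        have hfr : f' r = f r + c := by simpa using h r List.mem_cons_self
        simp only [List.map_cons, List.sum_cons, hrest, hfr]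
        ring
      · have har : a ≠ r := fun e => hna (e ▸ h1)
        have ha : f' a = f a := by simpa [har] using h a List.mem_cons_self
        simp only [List.map_cons, List.sum_cons, ha,
          ih hnd' h1 (fun j hj => h j (List.mem_cons_of_mem _ hj))]
        ring

theorem score_insert (d : PySem.Dict (Int × Int) Int) (p : List Char) (r : Nat) (x : Int)
    (hr : r < 40) :
    pvScoreB (d.insert (((r : Nat) : Int), x) (d.getD (((r : Nat) : Int), x) 0 + 1)) p
      = pvScoreB d p + (if x = pvChInt (p.getD (r % p.length) '0') then 1 else 0) := by
  unfold pvScoreB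
  apply sum_map_bump _ _ _ r _ (List.nodup_range) (List.mem_range.mpr hr)
  intro j _
  rw [PySem.Dict.getD_insert]
  by_cases hjr : j = r
  · subst hjr
    by_cases hx : x = pvChInt (p.getD (j % p.length) '0')
    · simp [hx]
    · rw [if_neg (fun e => hx ((Prod.ext_iff.mp e).2).symm), if_neg hx]
      simp
  · rw [if_neg (fun e => hjr (by simpa using congrArg Prod.fst e)), if_neg hjr]
    simp

theorem scoreB_eq (answers : List Int) (p : List Char)
    (hdvd : p.length ∣ 40) (hp : p.length ≠ 0) :
    pvScoreB (pvDictB answers) p = pvCnt p answers := by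
  induction answers using List.reverseRecOn with
  | nil =>
      unfold pvScoreB pvDictB pvCnt
      simp [PySem.List.enumerate_nil, PySem.Dict.getD_empty]
  | append_singleton xs x ih =>
      have hstep : pvDictB (xs ++ [x])
          = (pvDictB xs).insert (((xs.length % 40 : Nat) : Int), x)
              ((pvDictB xs).getD (((xs.length % 40 : Nat) : Int), x) 0 + 1) := by
        unfold pvDictB
        rw [PySem.List.enumerate_append, List.foldl_append]
        simp only [PySem.List.enumerate_cons, PySem.List.enumerate_nil, List.foldl, zero_add]
        have : PySem.Int.mod ((xs.length : Nat) : Int) 40 = ((xs.length % 40 : Nat) : Int) := by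
          exact_mod_cast PySem.Int.mod_natCast xs.length 40
        rw [this]
      rw [hstep, score_insert _ _ _ _ (Nat.mod_lt _ (by omega)), ih, cnt_snoc,
        Nat.mod_mod_of_dvd _ hdvd]

theorem select_eq (c0 c1 c2 : Int) (m : Int) :
    (if ([c0, c1, c2].count m) ≥ 3 then ([1, 2, 3] : List Int)
     else (List.range 3).foldl (fun acc i =>
       if m = PySem.List.pyGetD [c0, c1, c2] (Int.ofNat i) 0 then acc ++ [Int.ofNat i + 1] else acc) [])
    = (PySem.List.enumerate [c0, c1, c2] 0).foldl
        (fun acc ks => if ks.2 = m then acc ++ [ks.1 + 1] else acc) [] := by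
  have h : (List.range 3) = [0, 1, 2] := by decide
  have e : PySem.List.enumerate [c0, c1, c2] (0 : Int) = [(0, c0), (1, c1), (2, c2)] := by
    simp [PySem.List.enumerate_cons, PySem.List.enumerate_nil]
  have g0 : PySem.List.pyGetD [c0, c1, c2] (Int.ofNat 0) 0 = c0 := rfl
  have g1 : PySem.List.pyGetD [c0, c1, c2] (Int.ofNat 1) 0 = c1 := rfl
  have g2 : PySem.List.pyGetD [c0, c1, c2] (Int.ofNat 2) 0 = c2 := rfl
  have E : ∀ x : Int, (m = x) = (x = m) := fun x => propext eq_comm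
  simp only [h, e, List.foldl, List.count_cons, List.count_nil, g0, g1, g2, E]
  by_cases h0 : c0 = m <;> by_cases h1 : c1 = m <;> by_cases h2 : c2 = m <;>
    simp [h0, h1, h2]

-- ===== VERDICT (by name: the statement is the Claim_ definition above) =====
theorem solution_spec : Claim_equal_solution := by
  intro answers _
  unfold Spec_solution solution solution_alt
  have hm : pvPats.map (pvScoreB (pvDictB answers))
      = [pvCnt "12345".toList answers, pvCnt "21232425".toList answers,
         pvCnt "3311224455".toList answers] := by
    unfold pvPats
    simp only [List.map_cons, List.map_nil]
    rw [scoreB_eq _ _ (by decide) (by decide), scoreB_eq _ _ (by decide) (by decide),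
      scoreB_eq _ _ (by decide) (by decide)]
  have ha0 := countA_eq answers "12345".toList (by decide)
  have ha1 := countA_eq answers "21232425".toList (by decide)
  have ha2 := countA_eq answers "3311224455".toList (by decide)
  simp only [hm, ha0, ha1, ha2]
  exact select_eq _ _ _ _
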